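-- pv_equiv track=rewrite | github.com/sion9262/TIL | algorithm/코딩구현력기르기/정다면체.py | solve
-- ===== SOURCE A (Python) =====
-- def solve(n, m):
--     answer = []
--     sums = dict()
--     # sums = {1 : 2, 2 : 4 ...}
--     for i in range(1, n+1):
--         for j in range(1, m+1):
--             sum = i + j
--             if sum in sums:
--                 sums[sum] += 1
--             else:
--                 sums[sum] = 1
--     # maxValue 값 찾기
--     maxValue = max(sums.values())
--     # dict 순회
--     for key, value in sums.items():
--         if value == maxValue:
--             answer.append(key)
--     answer.sort()
--     # join() 시 int 면 안되기에 str 로 타입 변경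
--     answer = map(str, answer)
--     return ' '.join(answer)
-- ===== SOURCE B (Python) =====
-- def solve(n, m):
--     sums = range(2, n + m + 1)
--     freq = [min(s - 1, n, m, n + m + 1 - s) for s in sums]
--     top = max(freq)
--     return ' '.join(str(s) for s, f in zip(sums, freq) if f == top)
-- ===== Notes on version B (the rewrite author's own statement) =====
-- stated objective: faster
-- what changed: Replaces the O(n*m) dict-counting double loop by the closed-form frequency min(s-1,n,m,n+m+1-s) per sum, computed in one pass over the n+m-1 possible sums (no dict, no sort).
import Mathlib
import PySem

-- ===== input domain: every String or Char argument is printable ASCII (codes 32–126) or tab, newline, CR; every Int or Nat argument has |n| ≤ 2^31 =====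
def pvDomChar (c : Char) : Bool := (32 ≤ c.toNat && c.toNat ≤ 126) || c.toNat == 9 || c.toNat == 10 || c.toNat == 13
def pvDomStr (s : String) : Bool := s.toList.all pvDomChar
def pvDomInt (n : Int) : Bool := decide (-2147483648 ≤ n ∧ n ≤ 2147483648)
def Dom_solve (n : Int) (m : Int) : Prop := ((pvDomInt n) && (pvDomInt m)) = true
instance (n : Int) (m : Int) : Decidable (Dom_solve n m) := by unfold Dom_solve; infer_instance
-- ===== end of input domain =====

-- B replaces A's dict-counting double loop over all n*m pairs by the closed-form
-- frequency min(s-1, n, m, n+m+1-s) per sum s, computed in one pass over the n+m-1 sums.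

-- ===== PORT A =====
def solve (n : Int) (m : Int) : String :=
  let answer : List Int := []
  let sums : PySem.Dict Int Int := PySem.Dict.empty
  let sums := (PySem.List.pyRange 1 (n+1) 1).foldl (fun sums i =>
      (PySem.List.pyRange 1 (m+1) 1).foldl (fun sums j =>
        let sum := i + j
        if sums.contains sum then sums.insert sum (sums.getD sum 0 + 1)
        else sums.insert sum 1) sums) sums
  let maxValue : Int := (PySem.List.max? sums.values (fun v => v)).getD 0  -- max() of empty values raises: excluded by Pre_
  let answer := sums.items.foldl (fun answer kv =>
      if kv.2 = maxValue then answer ++ [kv.1] else answer) answer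
  let answer := PySem.List.sorted answer (fun x => x) false
  let answer := answer.map PySem.Int.toStr
  PySem.Str.join " " answer

-- ===== PORT B =====
def solve_alt (n : Int) (m : Int) : String :=
  let sums := PySem.List.pyRange 2 (n+m+1) 1
  let freq := sums.map (fun s => min (min (s-1) n) (min m (n+m+1-s)))
  let top : Int := (PySem.List.max? freq (fun v => v)).getD 0  -- max() of empty list raises: excluded by Pre_
  PySem.Str.join " " (((sums.zip freq).filter (fun p => p.2 == top)).map (fun p => PySem.Int.toStr p.1))

-- ===== PRECONDITION & SPEC =====
-- Pre_ excludes n < 1 or m < 1: there the dict stays empty and A's max(sums.values()) raises ValueError.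
def Pre_solve (n : Int) (m : Int) : Prop := 1 ≤ n ∧ 1 ≤ m
instance (n : Int) (m : Int) : Decidable (Pre_solve n m) := by unfold Pre_solve; infer_instance
def pvWitness_solve : Int × Int := (3, 4)
def Spec_solve (n : Int) (m : Int) (out : String) : Prop := out = solve_alt n m
instance (n : Int) (m : Int) (out : String) : Decidable (Spec_solve n m out) := by unfold Spec_solve; infer_instance

-- ===== CLAIM (what is proved, stated in full; the proofs are below) =====
def Claim_equal_solve : Prop := ∀ (n : Int) (m : Int), Dom_solve n m → Pre_solve n m → Spec_solve n m (solve n m)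

-- ===== LEMMAS AND PROOFS =====

-- the flat list of all pair sums i+j (1 ≤ i ≤ n, 1 ≤ j ≤ m), in A's loop order
def sumsList (n m : Int) : List Int :=
  (PySem.List.pyRange 1 (n+1) 1).flatMap (fun i => (PySem.List.pyRange 1 (m+1) 1).map (fun j => i + j))

-- the closed-form count of a sum s among the n*m pairs
def cnt (n m s : Int) : Int := max 0 (min (min (s-1) n) (min m (n+m+1-s)))

lemma count_pyRange (a b s : Int) :
    ((PySem.List.pyRange a b 1).count s : Int) = if a ≤ s ∧ s < b then 1 else 0 := by
  by_cases h : a ≤ s ∧ s < b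
  · have hmem : s ∈ PySem.List.pyRange a b 1 := PySem.List.mem_pyRange_one.mpr h
    have h1 : 1 ≤ (PySem.List.pyRange a b 1).count s := List.count_pos_iff.mpr hmem
    have h2 : (PySem.List.pyRange a b 1).count s ≤ 1 :=
      List.nodup_iff_count_le_one.mp (PySem.List.nodup_pyRange_one a b) s
    simp [h]; omega
  · have : s ∉ PySem.List.pyRange a b 1 := fun hc => h (PySem.List.mem_pyRange_one.mp hc)
    simp [h, List.count_eq_zero.mpr this]

lemma map_shift_pyRange (i m : Int) :
    (PySem.List.pyRange 1 (m+1) 1).map (fun j => i + j) = PySem.List.pyRange (i+1) (i+1+m) 1 := by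
  rw [PySem.List.pyRange_one, PySem.List.pyRange_one, List.map_map]
  have : (i+1+m - (i+1)).toNat = (m+1-1).toNat := by omega
  rw [this]
  apply List.map_congr_left
  intro k _
  simp; omega

lemma pyRange_one_one (a : Int) : PySem.List.pyRange a a 1 = [] := by
  rw [PySem.List.pyRange_one]; simp

lemma sumsList_succ (n m : Int) (hn : 0 ≤ n) :
    sumsList (n+1) m = sumsList n m ++ PySem.List.pyRange (n+2) (n+2+m) 1 := by
  unfold sumsList
  rw [show n+1+1 = (n+1)+1 by ring, PySem.List.pyRange_one_succ_right (by omega : (1:Int) ≤ n+1)]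
  rw [List.flatMap_append]
  simp [map_shift_pyRange (n+1) m]
  congr 1 <;> ring

lemma sumsList_count (m : Int) (hm : 0 ≤ m) :
    ∀ n, 0 ≤ n → ∀ s, ((sumsList n m).count s : Int) = cnt n m s := by
  intro n hn
  induction n, hn using Int.le_induction with
  | base =>
    intro s
    unfold sumsList
    rw [show (0:Int)+1 = 1 by ring, pyRange_one_one]
    simp [cnt]
  | succ n hn ih =>
    intro s
    rw [sumsList_succ n m hn, List.count_append]
    push_cast
    rw [ih s, count_pyRange]
    unfold cnt
    split_ifs with h <;> omega

lemma sumsList_keys (m : Int) (hm : 1 ≤ m) :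
    ∀ n, 1 ≤ n → PySem.Set.ofList (sumsList n m) = PySem.List.pyRange 2 (n+m+1) 1 := by
  intro n hn
  induction n, hn using Int.le_induction with
  | base =>
    unfold sumsList
    rw [show (1:Int)+1 = 2 by ring]
    rw [show PySem.List.pyRange 1 2 1 = [1] from by decide]
    simp [map_shift_pyRange 1 m]
    rw [PySem.Set.ofList_eq_self_of_nodup _ (PySem.List.nodup_pyRange_one _ _)]
    congr 1; ring
  | succ n hn ih =>
    rw [sumsList_succ n m (by omega), PySem.Set.ofList_append, ih,
        PySem.Set.update_eq_append_filter,
        PySem.Set.ofList_eq_self_of_nodup _ (PySem.List.nodup_pyRange_one _ _)]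
    have hsplit : PySem.List.pyRange (n+2) (n+2+m) 1
        = PySem.List.pyRange (n+2) (n+m+1) 1 ++ [n+m+1] := by
      rw [show n+2+m = (n+m+1)+1 by ring]
      exact PySem.List.pyRange_one_succ_right (by omega)
    rw [hsplit, List.filter_append]
    have h1 : (PySem.List.pyRange (n+2) (n+m+1) 1).filter
        (fun y => !(PySem.Set.contains (PySem.List.pyRange 2 (n+m+1) 1) y)) = [] := by
      rw [List.filter_eq_nil_iff]
      intro y hy
      have hb := PySem.List.mem_pyRange_one.mp hy
      simp [PySem.List.mem_pyRange_one]
      omega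
    have h2 : ([n+m+1] : List Int).filter
        (fun y => !(PySem.Set.contains (PySem.List.pyRange 2 (n+m+1) 1) y)) = [n+m+1] := by
      simp [List.filter, PySem.List.mem_pyRange_one]
    rw [h1, h2]
    simp
    rw [show n+1+m+1 = (n+m+1)+1 by ring]
    exact (PySem.List.pyRange_one_succ_right (by omega)).symm

lemma dict_eq (n m : Int) :
    ((PySem.List.pyRange 1 (n+1) 1).foldl (fun sums i =>
      (PySem.List.pyRange 1 (m+1) 1).foldl (fun sums j =>
        let sum := i + j
        if sums.contains sum then sums.insert sum (sums.getD sum 0 + 1)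
        else sums.insert sum 1) sums) (PySem.Dict.empty : PySem.Dict Int Int))
    = PySem.Dict.counter (sumsList n m) := by
  have hstep : ∀ (d : PySem.Dict Int Int) (s : Int),
      (if d.contains s then d.insert s (d.getD s 0 + 1) else d.insert s 1)
        = d.insert s (d.getD s 0 + 1) := by
    intro d s
    by_cases h : d.contains s
    · simp [h]
    · rw [if_neg h, PySem.Dict.getD_of_not_contains d 0 (by simpa using h)]
      norm_num
  rw [← PySem.Dict.foldl_insert_getD_add_one_eq_counter]
  unfold sumsList
  rw [List.flatMap, List.foldl_flatten, List.foldl_map]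
  simp only [hstep]
  congr 1
  funext sums i
  rw [List.foldl_map]

lemma foldl_append_key (l : List (Int × Int)) (v : Int) : ∀ acc : List Int,
    l.foldl (fun ans kv => if kv.2 = v then ans ++ [kv.1] else ans) acc
      = acc ++ (l.filter (fun kv => kv.2 == v)).map Prod.fst := by
  induction l with
  | nil => intro acc; simp
  | cons kv t ih =>
    intro acc
    by_cases h : kv.2 = v
    · simp [List.foldl_cons, h, ih]
    · simp [List.foldl_cons, h, ih]

lemma max_cnt (n m : Int) (hn : 1 ≤ n) (hm : 1 ≤ m) :
    PySem.List.max? ((PySem.List.pyRange 2 (n+m+1) 1).map (cnt n m)) (fun v => v)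
      = some (min n m) := by
  have hmem : min n m ∈ (PySem.List.pyRange 2 (n+m+1) 1).map (cnt n m) := by
    refine List.mem_map.mpr ⟨min n m + 1, PySem.List.mem_pyRange_one.mpr (by omega), ?_⟩
    unfold cnt; omega
  have hbound : ∀ v ∈ (PySem.List.pyRange 2 (n+m+1) 1).map (cnt n m), v ≤ min n m := by
    intro v hv
    obtain ⟨k, _, rfl⟩ := List.mem_map.mp hv
    unfold cnt; omega
  cases hcase : PySem.List.max? ((PySem.List.pyRange 2 (n+m+1) 1).map (cnt n m)) (fun v => v) with
  | none =>
    rw [PySem.List.max?_eq_none_iff] at hcase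
    rw [hcase] at hmem; simp at hmem
  | some M =>
    have h1 := PySem.List.max?_mem hcase
    have h2 := hbound M h1
    have h3 := PySem.List.max?_isMax hcase (min n m) hmem
    have : M = min n m := by omega
    rw [this]

lemma filter_cnt (n m : Int) (hn : 1 ≤ n) (hm : 1 ≤ m) :
    (PySem.List.pyRange 2 (n+m+1) 1).filter (fun k => cnt n m k == min n m)
      = PySem.List.pyRange (min n m+1) (max n m+2) 1 := by
  have hsplit : PySem.List.pyRange 2 (n+m+1) 1 = PySem.List.pyRange 2 (min n m+1) 1
      ++ (PySem.List.pyRange (min n m+1) (max n m+2) 1 ++ PySem.List.pyRange (max n m+2) (n+m+1) 1) := by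
    rw [← PySem.List.pyRange_one_append (min n m+1) (max n m+2) (n+m+1) (by omega) (by omega),
        ← PySem.List.pyRange_one_append 2 (min n m+1) (n+m+1) (by omega) (by omega)]
  rw [hsplit, List.filter_append, List.filter_append]
  have h1 : (PySem.List.pyRange 2 (min n m+1) 1).filter (fun k => cnt n m k == min n m) = [] := by
    rw [List.filter_eq_nil_iff]
    intro k hk
    have hb := PySem.List.mem_pyRange_one.mp hk
    simp only [beq_iff_eq]
    unfold cnt; omega
  have h2 : (PySem.List.pyRange (min n m+1) (max n m+2) 1).filter (fun k => cnt n m k == min n m)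
      = PySem.List.pyRange (min n m+1) (max n m+2) 1 := by
    rw [List.filter_eq_self]
    intro k hk
    have hb := PySem.List.mem_pyRange_one.mp hk
    simp only [beq_iff_eq]
    unfold cnt; omega
  have h3 : (PySem.List.pyRange (max n m+2) (n+m+1) 1).filter (fun k => cnt n m k == min n m) = [] := by
    rw [List.filter_eq_nil_iff]
    intro k hk
    have hb := PySem.List.mem_pyRange_one.mp hk
    simp only [beq_iff_eq]
    unfold cnt; omega
  rw [h1, h2, h3, List.nil_append, List.append_nil]

lemma solve_closed (n m : Int) (hn : 1 ≤ n) (hm : 1 ≤ m) :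
    solve n m = PySem.Str.join " "
      ((PySem.List.pyRange (min n m+1) (max n m+2) 1).map PySem.Int.toStr) := by
  have hcnt : ∀ s, ((sumsList n m).count s : Int) = cnt n m s :=
    sumsList_count m (by omega) n (by omega)
  have hkeys := sumsList_keys m hm n hn
  unfold solve
  simp only [dict_eq, PySem.Dict.items_counter, hkeys]
  set K := PySem.List.pyRange 2 (n+m+1) 1 with hK
  set c : Int → Int := fun k => ((sumsList n m).count k : Int) with hc
  have hmapc : K.map c = K.map (cnt n m) := List.map_congr_left (fun k _ => hcnt k)
  have hval : (PySem.Dict.counter (sumsList n m)).values = K.map c := by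
    simp only [PySem.Dict.values, PySem.Dict.items_counter, hkeys, List.map_map]
    rfl
  have hmaxD : (PySem.List.max? ((PySem.Dict.counter (sumsList n m)).values) (fun v => v)).getD 0
      = min n m := by
    rw [hval, hmapc, max_cnt n m hn hm]; rfl
  rw [hmaxD]
  rw [foldl_append_key, List.nil_append, List.filter_map, List.map_map]
  have hid : (Prod.fst ∘ fun k : Int => (k, ((List.count k (sumsList n m) : Nat) : Int))) = id := rfl
  rw [hid, List.map_id]
  have hpred : ∀ k ∈ K,
      ((fun kv : Int × Int => kv.2 == min n m) ∘ fun k => (k, ((List.count k (sumsList n m) : Nat) : Int))) k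
        = (fun k => cnt n m k == min n m) k := by
    intro k _
    simp only [Function.comp, hcnt]
  rw [List.filter_congr hpred, filter_cnt n m hn hm]
  rw [PySem.List.sorted_eq_self_of_pairwise _ _
      ((PySem.List.pairwise_lt_pyRange_one _ _).imp le_of_lt)]

lemma alt_closed (n m : Int) (hn : 1 ≤ n) (hm : 1 ≤ m) :
    solve_alt n m = PySem.Str.join " "
      ((PySem.List.pyRange (min n m+1) (max n m+2) 1).map PySem.Int.toStr) := by
  unfold solve_alt
  simp only []
  set K := PySem.List.pyRange 2 (n+m+1) 1 with hK
  set c' : Int → Int := fun s => min (min (s-1) n) (min m (n+m+1-s)) with hc'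
  have hmapc : K.map c' = K.map (cnt n m) := by
    apply List.map_congr_left
    intro k hk
    have hb := PySem.List.mem_pyRange_one.mp hk
    rw [hc']; unfold cnt; simp only []; omega
  have htop : (PySem.List.max? (K.map c') (fun v => v)).getD 0 = min n m := by
    rw [hmapc, max_cnt n m hn hm]; rfl
  rw [htop]
  have hzip : K.zip (K.map c') = K.map (fun s => (s, c' s)) := by
    conv_lhs => rw [show K.zip (K.map c') = (K.map id).zip (K.map c') by rw [List.map_id]]
    rw [List.zip_map']; rfl
  rw [hzip, List.filter_map, List.map_map]
  have hpred : ∀ k ∈ K,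
      ((fun p : Int × Int => p.2 == min n m) ∘ fun s => (s, c' s)) k
        = (fun k => cnt n m k == min n m) k := by
    intro k hk
    have hb := PySem.List.mem_pyRange_one.mp hk
    rw [hc']
    simp only [Function.comp]
    unfold cnt
    have hx : max 0 (min (min (k - 1) n) (min m (n + m + 1 - k)))
        = min (min (k - 1) n) (min m (n + m + 1 - k)) := by omega
    rw [hx]
  rw [List.filter_congr hpred, filter_cnt n m hn hm]
  rfl

-- ===== VERDICT (by name: the statement is the Claim_ definition above) =====
theorem solve_spec : Claim_equal_solve := by
  intro n m _ hpre
  exact (solve_closed n m hpre.1 hpre.2).trans (alt_closed n m hpre.1 hpre.2).symm
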